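-- pv_equiv track=rewrite | github.com/MaastrichtU-CDS/general_coding_practices | excercises/Anniek_van_Hienen/python/dummyproject/test/Drieopeenrij/players.py | get_all_lines
-- ===== SOURCE A (Python) =====
-- def get_all_lines(matrix, n):
--     lines = []
--
--     # All rows
--     for row in matrix:
--         lines.append(row)
--
--     # All columns
--     for col in range(n):
--         line = [matrix[row][col] for row in range(n)]
--         lines.append(line)
--
--     # Main diagonal (top-left to bottom-right)
--     lines.append([matrix[i][i] for i in range(n)])
--
--     # Anti diagonal (top-right to bottom-left)
--     lines.append([matrix[i][n - 1 - i] for i in range(n)])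
--
--     return lines
-- ===== SOURCE B (Python) =====
-- def get_all_lines(matrix, n):
--     # Flatten the n*n block row-major once, then read every column and both
--     # diagonals out of the flat buffer with stride slices:
--     # column j has stride n, the main diagonal stride n+1, the anti diagonal
--     # stride n-1 (degenerate at n == 1, where the anti diagonal is the whole
--     # single-element buffer).
--     flat = [matrix[i][j] for i in range(n) for j in range(n)]
--     cols = [flat[j::n] for j in range(n)]
--     diag = flat[::n + 1]
--     anti = flat[n - 1:n * n - 1:n - 1] if n != 1 else flat
--     return list(matrix) + cols + [diag, anti]
-- ===== Notes on version B (the rewrite author's own statement) =====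
-- stated objective: alternative
-- what changed: A builds columns and diagonals by separate index comprehensions over the 2-D matrix; B flattens the n*n block into one row-major buffer and extracts every column (stride n) and both diagonals (strides n+1 and n-1) as stride slices of that flat buffer.
-- outside the precondition, e.g. on get_all_lines([[1]], -1): A returns [[1], [], []], B raises ValueError
import Mathlib
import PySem

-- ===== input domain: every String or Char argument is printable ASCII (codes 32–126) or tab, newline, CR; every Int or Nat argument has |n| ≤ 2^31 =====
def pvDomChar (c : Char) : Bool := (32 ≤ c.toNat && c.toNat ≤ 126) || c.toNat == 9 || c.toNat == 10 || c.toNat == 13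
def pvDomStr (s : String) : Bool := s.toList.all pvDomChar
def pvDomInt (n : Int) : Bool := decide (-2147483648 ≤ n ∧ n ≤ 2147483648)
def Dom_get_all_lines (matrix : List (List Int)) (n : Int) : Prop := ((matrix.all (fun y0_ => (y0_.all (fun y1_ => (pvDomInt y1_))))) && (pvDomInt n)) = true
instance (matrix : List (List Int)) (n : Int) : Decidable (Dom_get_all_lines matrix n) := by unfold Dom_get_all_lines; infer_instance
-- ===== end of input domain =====

-- B flattens the n*n block row-major into one buffer and extracts every column
-- (stride n) and both diagonals (strides n+1 and n-1) as stride slices of it,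
-- instead of A's separate index comprehensions (objective: alternative, same cost).

-- ===== PORT A =====
def get_all_lines (matrix : List (List Int)) (n : Int) : List (List Int) :=
  let lines : List (List Int) := matrix.foldl (fun acc row => acc ++ [row]) []
  -- all columns
  let lines := (PySem.List.pyRange 0 n 1).foldl (fun acc col =>
    acc ++ [(PySem.List.pyRange 0 n 1).map (fun row =>
      PySem.List.pyGetD (PySem.List.pyGetD matrix row []) col 0)]) lines
  -- main diagonal
  let lines := lines ++ [(PySem.List.pyRange 0 n 1).map (fun i =>
      PySem.List.pyGetD (PySem.List.pyGetD matrix i []) i 0)]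
  -- anti diagonal
  let lines := lines ++ [(PySem.List.pyRange 0 n 1).map (fun i =>
      PySem.List.pyGetD (PySem.List.pyGetD matrix i []) (n - 1 - i) 0)]
  lines

-- ===== PORT B =====
-- The `.getD []` after each slice is unreachable where the Python returns:
-- slice? is none only for step 0, i.e. n = -1 (diag) or n = 1 (anti, guarded
-- by the branch), and Pre_ excludes n = -1, where the Python raises ValueError.
def get_all_lines_alt (matrix : List (List Int)) (n : Int) : List (List Int) :=
  let flat : List Int := (PySem.List.pyRange 0 n 1).flatMap (fun i =>
    (PySem.List.pyRange 0 n 1).map (fun j =>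
      PySem.List.pyGetD (PySem.List.pyGetD matrix i []) j 0))
  let cols := (PySem.List.pyRange 0 n 1).map (fun j =>
    (PySem.List.slice? flat (some j) none n).getD [])
  let diag := (PySem.List.slice? flat none none (n + 1)).getD []
  let anti := if n ≠ 1 then
      (PySem.List.slice? flat (some (n - 1)) (some (n * n - 1)) (n - 1)).getD []
    else flat
  matrix ++ cols ++ [diag, anti]

-- ===== PRECONDITION & SPEC =====
-- Pre_ excludes exactly the inputs on which one of the Pythons raises: A's
-- IndexError (n larger than the number of rows, or one of the first n rows
-- shorter than n) and n = -1, where A returns matrix + [[], []] but B's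
-- main-diagonal stride n+1 is 0 and raises ValueError.
def Pre_get_all_lines (matrix : List (List Int)) (n : Int) : Prop :=
  n ≠ -1 ∧ n ≤ matrix.length ∧ ∀ row ∈ matrix.take n.toNat, n ≤ row.length
instance (matrix : List (List Int)) (n : Int) : Decidable (Pre_get_all_lines matrix n) := by
  unfold Pre_get_all_lines; infer_instance
def pvWitness_get_all_lines : List (List Int) × Int := ([[1, 2], [3, 4]], 2)

def Spec_get_all_lines (matrix : List (List Int)) (n : Int) (out : List (List Int)) : Prop := out = get_all_lines_alt matrix n
instance (matrix : List (List Int)) (n : Int) (out : List (List Int)) : Decidable (Spec_get_all_lines matrix n out) := by unfold Spec_get_all_lines; infer_instance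

-- ===== CLAIM (what is proved, stated in full; the proofs are below) =====
def Claim_equal_get_all_lines : Prop := ∀ (matrix : List (List Int)) (n : Int), Dom_get_all_lines matrix n → Pre_get_all_lines matrix n → Spec_get_all_lines matrix n (get_all_lines matrix n)

-- ===== LEMMAS AND PROOFS =====

-- the (i,j) entry read by both programs, and B's flat buffer
def pvF (matrix : List (List Int)) (i j : Int) : Int :=
  PySem.List.pyGetD (PySem.List.pyGetD matrix i []) j 0
def pvFlat (matrix : List (List Int)) (n : Int) : List Int :=
  (PySem.List.pyRange 0 n 1).flatMap (fun i =>
    (PySem.List.pyRange 0 n 1).map (fun j => pvF matrix i j))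

-- row-major indexing into a flattening of uniform-length rows
theorem pv_flatten_get {α : Type} (m : Nat) :
    ∀ (l : List (List α)) (i j : Nat), (∀ x ∈ l, x.length = m) → j < m →
      l.flatten[(i * m + j)]? = l[i]?.bind (fun r => r[j]?) := by
  intro l
  induction l with
  | nil => intro i j _ _; simp
  | cons x xs ih =>
    intro i j hlen hj
    have hx : x.length = m := hlen x (by simp)
    cases i with
    | zero =>
      rw [List.flatten_cons, Nat.zero_mul, Nat.zero_add,
        List.getElem?_append_left (by omega)]
      simp
    | succ i =>
      have h1 : (i + 1) * m + j = m + (i * m + j) := by ring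
      rw [List.flatten_cons, h1, List.getElem?_append_right (by omega), hx]
      have h2 : m + (i * m + j) - m = i * m + j := by omega
      rw [h2, ih i j (fun y hy => hlen y (by simp [hy])) hj]
      simp

theorem pv_flat_length (matrix : List (List Int)) (n : Int) :
    (pvFlat matrix n).length = n.toNat * n.toNat := by
  simp [pvFlat, List.length_flatMap, PySem.List.pyRange_one, Function.comp_def,
    List.map_const']

theorem pv_flat_get (matrix : List (List Int)) (n i j : Int)
    (hi0 : 0 ≤ i) (hi : i < n) (hj0 : 0 ≤ j) (hj : j < n) :
    (pvFlat matrix n)[(i * n + j).toNat]? = some (pvF matrix i j) := by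
  have hn : 0 < n := lt_of_le_of_lt hj0 hj
  have e : (i * n + j).toNat = i.toNat * n.toNat + j.toNat := by
    have : i * n + j = ((i.toNat * n.toNat + j.toNat : Nat) : Int) := by
      push_cast [Int.toNat_of_nonneg hi0, Int.toNat_of_nonneg hj0,
        Int.toNat_of_nonneg (le_of_lt hn)]
      ring
    rw [this, Int.toNat_natCast]
  rw [pvFlat, List.flatMap_def, e,
    pv_flatten_get n.toNat _ i.toNat j.toNat ?hlen (by omega)]
  · simp only [PySem.List.pyRange_one, List.getElem?_map, Int.sub_zero]
    have hi' : i.toNat < n.toNat := by omega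
    have hj' : j.toNat < n.toNat := by omega
    simp [hi', hj', Int.toNat_of_nonneg hi0, Int.toNat_of_nonneg hj0]
  case hlen =>
    intro x hx
    obtain ⟨a, _, rfl⟩ := List.mem_map.mp hx
    simp [PySem.List.pyRange_one]

-- a slice with positive step evaluated to its index reads
theorem pv_slice?_pos (xs : List Int) (a b st : Int) (ha : 0 ≤ a)
    (hab : a ≤ b) (hb : b ≤ xs.length) (hst : 0 < st) :
    PySem.List.slice? xs (some a) (some b) st =
      some (List.filterMap (fun k => xs[(a + st * (k : Int)).toNat]?)
        (List.range ((b - a + st - 1) / st).toNat)) := by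
  simp only [PySem.List.slice?, PySem.List.sliceIndices]
  have h1 : ¬ st = 0 := by omega
  have h2 : ¬ st < 0 := by omega
  have h3 : ¬ a < 0 := by omega
  have h4 : ¬ b < 0 := by omega
  simp only [h1, h2, h3, h4, if_false, min_eq_left hb,
    min_eq_left (le_trans hab hb), if_pos hst]
  rcases lt_or_eq_of_le hab with h | h
  · rw [if_pos h]
    simp only [List.pure_def, List.bind_eq_flatMap, ← List.map_eq_flatMap,
      List.filterMap_map]
    rfl
  · subst h
    rw [if_neg (lt_irrefl _)]
    have h0 : (a - a + st - 1) / st = 0 :=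
      Int.ediv_eq_zero_of_lt (by omega) (by omega)
    rw [h0]
    simp

theorem pv_slice?_pos_none (xs : List Int) (a st : Int) (ha : 0 ≤ a)
    (hL : a ≤ xs.length) (hst : 0 < st) :
    PySem.List.slice? xs (some a) none st =
      some (List.filterMap (fun k => xs[(a + st * (k : Int)).toNat]?)
        (List.range ((xs.length - a + st - 1) / st).toNat)) := by
  simp only [PySem.List.slice?, PySem.List.sliceIndices]
  have h1 : ¬ st = 0 := by omega
  have h2 : ¬ st < 0 := by omega
  have h3 : ¬ a < 0 := by omega
  simp only [h1, h2, h3, if_false, min_eq_left hL, if_pos hst]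
  rcases lt_or_eq_of_le hL with h | h
  · rw [if_pos h]
    simp only [List.pure_def, List.bind_eq_flatMap, ← List.map_eq_flatMap,
      List.filterMap_map]
    rfl
  · rw [h, if_neg (lt_irrefl _)]
    have h0 : ((xs.length : Int) - xs.length + st - 1) / st = 0 :=
      Int.ediv_eq_zero_of_lt (by omega) (by omega)
    rw [h0]
    simp

theorem pv_slice?_none_none (xs : List Int) (st : Int) (hst : 0 < st) :
    PySem.List.slice? xs none none st =
      some (List.filterMap (fun k => xs[(st * (k : Int)).toNat]?)
        (List.range (((xs.length : Int) + st - 1) / st).toNat)) := by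
  have := pv_slice?_pos_none xs 0 st le_rfl (by positivity) hst
  simp only [PySem.List.slice?, PySem.List.sliceIndices] at this ⊢
  have h1 : ¬ st = 0 := by omega
  have h2 : ¬ st < 0 := by omega
  simp only [h1, h2, if_false, if_pos hst] at this ⊢
  simpa using this

-- every slice of the empty buffer reads back as []
theorem pv_slice?_nil_getD (a? b? : Option Int) (st : Int) :
    (PySem.List.slice? ([] : List Int) a? b? st).getD [] = [] := by
  simp only [PySem.List.slice?, PySem.List.sliceIndices]
  split_ifs <;> simp

theorem pv_filterMap_some {α β : Type} (g : α → β) (l : List α) :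
    l.filterMap (fun x => some (g x)) = l.map g := by
  simp

theorem pv_flat_len_int (matrix : List (List Int)) (n : Int) (hn : 0 < n) :
    ((pvFlat matrix n).length : Int) = n * n := by
  rw [pv_flat_length]
  push_cast [Int.toNat_of_nonneg hn.le]
  ring

theorem pv_flat_nil (matrix : List (List Int)) (n : Int) (hn : n ≤ 0) :
    pvFlat matrix n = [] := by
  rw [pvFlat, PySem.List.pyRange_one_eq_nil hn]
  rfl

-- column j of the block is the stride-n slice of the flat buffer starting at j
theorem pv_col_slice (matrix : List (List Int)) (n j : Int) (hj0 : 0 ≤ j) (hj : j < n) :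
    (PySem.List.slice? (pvFlat matrix n) (some j) none n).getD [] =
      (PySem.List.pyRange 0 n 1).map (fun i => pvF matrix i j) := by
  have hn : 0 < n := by omega
  have hlen := pv_flat_len_int matrix n hn
  rw [pv_slice?_pos_none _ _ _ hj0 (by rw [hlen]; nlinarith) hn]
  have hc : (((pvFlat matrix n).length : Int) - j + n - 1) / n = n := by
    rw [hlen]
    have h : n * n - j + n - 1 = (n - 1 - j) + n * n := by ring
    rw [h, Int.add_mul_ediv_right _ _ (by omega),
      Int.ediv_eq_zero_of_lt (by omega) (by omega), zero_add]
  rw [hc, Option.getD_some,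
    List.filterMap_congr (g := fun (k : Int) => some (pvF matrix k j)) ?_,
    pv_filterMap_some]
  · simp [List.pure_def, List.bind_eq_flatMap, ← List.map_eq_flatMap,
      PySem.List.pyRange_one]
  · intro k hk
    simp only [List.pure_def, List.bind_eq_flatMap, ← List.map_eq_flatMap] at hk
    obtain ⟨m, hm, rfl⟩ := List.mem_map.mp hk
    have hm' := List.mem_range.mp hm
    have hk0 : (0 : Int) ≤ (m : Int) := Int.natCast_nonneg m
    have hk' : ((m : Nat) : Int) < n := by omega
    have h : j + n * (m : Int) = (m : Int) * n + j := by ring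
    rw [h]
    exact pv_flat_get matrix n _ j hk0 hk' hj0 hj

-- the main diagonal is the stride-(n+1) slice of the whole flat buffer
theorem pv_diag_slice (matrix : List (List Int)) (n : Int) (hn : 0 < n) :
    (PySem.List.slice? (pvFlat matrix n) none none (n + 1)).getD [] =
      (PySem.List.pyRange 0 n 1).map (fun i => pvF matrix i i) := by
  have hlen := pv_flat_len_int matrix n hn
  rw [pv_slice?_none_none _ _ (by omega)]
  have hc : (((pvFlat matrix n).length : Int) + (n + 1) - 1) / (n + 1) = n := by
    rw [hlen]
    have h : n * n + (n + 1) - 1 = 0 + n * (n + 1) := by ring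
    rw [h, Int.add_mul_ediv_right _ _ (by omega), Int.zero_ediv, zero_add]
  rw [hc, Option.getD_some,
    List.filterMap_congr (g := fun (k : Int) => some (pvF matrix k k)) ?_,
    pv_filterMap_some]
  · simp [List.pure_def, List.bind_eq_flatMap, ← List.map_eq_flatMap,
      PySem.List.pyRange_one]
  · intro k hk
    simp only [List.pure_def, List.bind_eq_flatMap, ← List.map_eq_flatMap] at hk
    obtain ⟨m, hm, rfl⟩ := List.mem_map.mp hk
    have hm' := List.mem_range.mp hm
    have hk0 : (0 : Int) ≤ (m : Int) := Int.natCast_nonneg m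
    have hk' : ((m : Nat) : Int) < n := by omega
    have h : (n + 1) * (m : Int) = (m : Int) * n + (m : Int) := by ring
    rw [h]
    exact pv_flat_get matrix n _ _ hk0 hk' hk0 hk'

-- the anti diagonal is the stride-(n-1) slice from n-1 up to n*n-1 (n ≥ 2)
theorem pv_anti_slice (matrix : List (List Int)) (n : Int) (hn : 2 ≤ n) :
    (PySem.List.slice? (pvFlat matrix n) (some (n - 1)) (some (n * n - 1)) (n - 1)).getD [] =
      (PySem.List.pyRange 0 n 1).map (fun i => pvF matrix i (n - 1 - i)) := by
  have hlen := pv_flat_len_int matrix n (by omega)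
  rw [pv_slice?_pos _ _ _ _ (by omega) (by nlinarith) (by rw [hlen]; omega) (by omega)]
  have hc : (n * n - 1 - (n - 1) + (n - 1) - 1) / (n - 1) = n := by
    have h : n * n - 1 - (n - 1) + (n - 1) - 1 = (n - 2) + n * (n - 1) := by ring
    rw [h, Int.add_mul_ediv_right _ _ (by omega),
      Int.ediv_eq_zero_of_lt (by omega) (by omega), zero_add]
  rw [hc, Option.getD_some,
    List.filterMap_congr (g := fun (k : Int) => some (pvF matrix k (n - 1 - k))) ?_,
    pv_filterMap_some]
  · simp [List.pure_def, List.bind_eq_flatMap, ← List.map_eq_flatMap,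
      PySem.List.pyRange_one]
  · intro k hk
    simp only [List.pure_def, List.bind_eq_flatMap, ← List.map_eq_flatMap] at hk
    obtain ⟨m, hm, rfl⟩ := List.mem_map.mp hk
    have hm' := List.mem_range.mp hm
    have hk0 : (0 : Int) ≤ (m : Int) := Int.natCast_nonneg m
    have hk' : ((m : Nat) : Int) < n := by omega
    have h : n - 1 + (n - 1) * (m : Int) = (m : Int) * n + (n - 1 - (m : Int)) := by ring
    rw [h]
    exact pv_flat_get matrix n _ _ hk0 hk' (by omega) (by omega)

-- both ports, written as rows ++ columns ++ [diagonal, anti diagonal]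
theorem pv_a_char (matrix : List (List Int)) (n : Int) :
    get_all_lines matrix n =
      matrix ++ ((PySem.List.pyRange 0 n 1).map (fun col =>
          (PySem.List.pyRange 0 n 1).map (fun row => pvF matrix row col)) ++
        [(PySem.List.pyRange 0 n 1).map (fun i => pvF matrix i i),
         (PySem.List.pyRange 0 n 1).map (fun i => pvF matrix i (n - 1 - i))]) := by
  unfold get_all_lines pvF
  simp [List.append_assoc, ← List.flatMap_def, ← List.map_eq_flatMap]

theorem pv_alt_char (matrix : List (List Int)) (n : Int) :
    get_all_lines_alt matrix n =
      matrix ++ ((PySem.List.pyRange 0 n 1).map (fun j =>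
          (PySem.List.slice? (pvFlat matrix n) (some j) none n).getD []) ++
        [(PySem.List.slice? (pvFlat matrix n) none none (n + 1)).getD [],
         if n ≠ 1 then
           (PySem.List.slice? (pvFlat matrix n) (some (n - 1)) (some (n * n - 1)) (n - 1)).getD []
         else pvFlat matrix n]) := by
  unfold get_all_lines_alt pvFlat pvF
  simp [List.append_assoc]

theorem pv_main (matrix : List (List Int)) (n : Int) :
    get_all_lines matrix n = get_all_lines_alt matrix n := by
  rw [pv_a_char, pv_alt_char]
  by_cases hn : 0 < n
  · congr 1
    congr 1
    · refine (List.map_congr_left ?_).symm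
      intro j hj
      rw [PySem.List.mem_pyRange_one] at hj
      exact pv_col_slice matrix n j hj.1 hj.2
    · congr 1
      · exact (pv_diag_slice matrix n hn).symm
      · congr 1
        by_cases hn1 : n = 1
        · subst hn1
          rw [if_neg (by simp)]
          norm_num [pvFlat, PySem.List.pyRange_one]
        · rw [if_pos hn1]
          exact (pv_anti_slice matrix n (by omega)).symm
  · have hflat := pv_flat_nil matrix n (by omega)
    rw [hflat, PySem.List.pyRange_one_eq_nil (by omega)]
    split_ifs <;> simp [pv_slice?_nil_getD]

-- ===== VERDICT (by name: the statement is the Claim_ definition above) =====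
theorem get_all_lines_spec : Claim_equal_get_all_lines := by
  intro matrix n _ _
  unfold Spec_get_all_lines
  exact pv_main matrix n
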